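-- pv_equiv track=rewrite | github.com/letterpigeon/gfg_solutions | gfg_solutions/circle_of_strings.py | can_form_circle
-- ===== SOURCE A (Python) =====
-- from collections import defaultdict
--
-- def can_form_circle(arr):
--     def dfs(graph, node, visited):
--         visited[node] = True
--         for neighbor in graph[node]:
--             if not visited[neighbor]:
--                 dfs(graph, neighbor, visited)
--
--     if not arr:
--         return 0
--
--     graph = defaultdict(list)
--     in_degree = defaultdict(int)
--     out_degree = defaultdict(int)
--
--     for word in arr:
--         start, end = word[0], word[-1]
--         graph[start].append(end)
--         out_degree[start] += 1
--         in_degree[end] += 1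
--
--     for node in graph:
--         if in_degree[node] != out_degree[node]:
--             return 0
--
--     visited = {node: False for node in graph}
--     start = arr[0][0]
--     dfs(graph, start, visited)
--     for node in visited:
--         if not visited[node]:
--             return 0
--     return 1
-- ===== SOURCE B (Python) =====
-- from collections import Counter
--
-- def can_form_circle(arr):
--     if not arr:
--         return 0
--     outs = Counter(w[0] for w in arr)
--     ins = Counter(w[-1] for w in arr)
--     if any(ins[c] != outs[c] for c in outs):
--         return 0
--     reach = {arr[0][0]}
--     for _ in arr:
--         for w in arr:
--             if w[0] in reach:
--                 reach.add(w[-1])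
--     return 1 if all(c in reach for c in outs) else 0
-- ===== Notes on version B (the rewrite author's own statement) =====
-- stated objective: alternative
-- what changed: Replaced the adjacency-list graph with defaultdict degree maps and a recursive DFS connectivity check by two Counters for the degree balance and an iterative fixed-point closure (n sweeps of a reachable set over the word list) for connectivity; no graph is built and no recursion is used.
import Mathlib
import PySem

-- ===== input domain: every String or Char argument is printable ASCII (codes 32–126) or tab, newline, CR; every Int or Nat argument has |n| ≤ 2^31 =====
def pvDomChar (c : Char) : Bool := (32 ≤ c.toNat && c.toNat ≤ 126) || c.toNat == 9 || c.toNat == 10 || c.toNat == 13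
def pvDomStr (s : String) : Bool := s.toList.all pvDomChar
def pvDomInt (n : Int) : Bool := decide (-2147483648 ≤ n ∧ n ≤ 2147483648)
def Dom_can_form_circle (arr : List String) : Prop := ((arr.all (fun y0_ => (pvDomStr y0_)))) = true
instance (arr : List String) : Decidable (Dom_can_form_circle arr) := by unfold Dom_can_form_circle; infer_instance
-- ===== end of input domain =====

-- B replaces A's defaultdict adjacency graph + recursive DFS by Counter degree maps and an
-- iterative fixed-point closure of the reachable letter set; equal return value proved on Pre_.

-- ===== PORT A =====
-- w[0] / w[-1]; exact for nonempty w (Pre_ excludes the empty string, where Python raises IndexError)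
def pvHd (w : String) : Char := w.toList.headD ' '
def pvLst (w : String) : Char := w.toList.getLastD ' '

-- number of keys still mapped to False (used only as termination fuel for the DFS recursion)
def pvCountFalse (v : PySem.Dict Char Bool) : Nat :=
  (v.keys.filter (fun k => v.get? k == some false)).length

mutual
-- literal port of A's recursive dfs; `fuel` only makes the recursion structurally terminating
-- (pvCountFalse visited + 1 is always enough, proved below).  When a neighbour is absent from
-- `visited` Python raises KeyError — that situation is unreachable once the degree check has
-- passed (every end letter is then also a start letter); the port skips such a neighbour.
def pvDfs (g : PySem.Dict Char (List Char)) (fuel : Nat) (node : Char) (v : PySem.Dict Char Bool) : PySem.Dict Char Bool :=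
  match fuel with
  | 0 => v
  | Nat.succ f => pvDfsGo g f (g.getD node []) (v.insert node true)
termination_by (fuel, 0)
def pvDfsGo (g : PySem.Dict Char (List Char)) (f : Nat) (ns : List Char) (v : PySem.Dict Char Bool) : PySem.Dict Char Bool :=
  match ns with
  | [] => v
  | nb :: rest =>
    match v.get? nb with
    | some false => pvDfsGo g f rest (pvDfs g f nb v)
    | _ => pvDfsGo g f rest v
termination_by (f, ns.length + 1)
end

def can_form_circle (arr : List String) : Int :=
  if arr = [] then 0
  else
    -- one loop over arr filling graph / out_degree / in_degree (a triple of dicts)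
    let st := arr.foldl (fun st w =>
        (st.1.modify (pvHd w) [] (fun l => l ++ [pvLst w]),
         st.2.1.modify (pvHd w) 0 (· + 1),
         st.2.2.modify (pvLst w) 0 (· + 1)))
      ((PySem.Dict.empty : PySem.Dict Char (List Char)),
       (PySem.Dict.empty : PySem.Dict Char Int),
       (PySem.Dict.empty : PySem.Dict Char Int))
    let g := st.1
    let outd := st.2.1
    let ind := st.2.2
    if g.keys.any (fun node => !(ind.getD node 0 == outd.getD node 0)) then 0
    else
      let visited0 := g.keys.foldl (fun d k => d.insert k false) PySem.Dict.empty
      let start := pvHd (arr.headD "")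
      let visited := pvDfs g (pvCountFalse visited0 + 1) start visited0
      if visited.keys.any (fun node => !(visited.getD node false)) then 0 else 1

-- ===== PORT B =====
def can_form_circle_alt (arr : List String) : Int :=
  if arr = [] then 0
  else
    let outs := PySem.Dict.counter (arr.map (fun w => pvHd w))
    let ins := PySem.Dict.counter (arr.map (fun w => pvLst w))
    if outs.keys.any (fun c => !(ins.getD c 0 == outs.getD c 0)) then 0
    else
      let reach := arr.foldl
        (fun r _ => arr.foldl
          (fun r w => if PySem.Set.contains r (pvHd w) then PySem.Set.add r (pvLst w) else r) r)
        (PySem.Set.ofList [pvHd (arr.headD "")])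
      if outs.keys.all (fun c => PySem.Set.contains reach c) then 1 else 0

-- ===== PRECONDITION & SPEC =====
-- Pre_ excludes lists containing an empty string: there Python's word[0] raises IndexError (in A and in B alike).
def Pre_can_form_circle (arr : List String) : Prop := ∀ w ∈ arr, w ≠ ""
instance (arr : List String) : Decidable (Pre_can_form_circle arr) := by unfold Pre_can_form_circle; infer_instance
def pvWitness_can_form_circle : List String := ["ab", "ba"]
def Spec_can_form_circle (arr : List String) (out : Int) : Prop := out = can_form_circle_alt arr
instance (arr : List String) (out : Int) : Decidable (Spec_can_form_circle arr out) := by unfold Spec_can_form_circle; infer_instance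

-- ===== CLAIM (what is proved, stated in full; the proofs are below) =====
def Claim_equal_can_form_circle : Prop := ∀ (arr : List String), Dom_can_form_circle arr → Pre_can_form_circle arr → Spec_can_form_circle arr (can_form_circle arr)

-- ===== LEMMAS AND PROOFS =====

-- edge relation and reachability of the word graph
def pvE (arr : List String) (x y : Char) : Prop := ∃ w ∈ arr, pvHd w = x ∧ pvLst w = y
def pvR (arr : List String) : Char → Char → Prop := Relation.ReflTransGen (pvE arr)

-- the three dictionaries A builds, as separate folds
def pvG (arr : List String) : PySem.Dict Char (List Char) :=
  arr.foldl (fun d w => d.modify (pvHd w) [] (fun l => l ++ [pvLst w])) PySem.Dict.empty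
def pvOD (arr : List String) : PySem.Dict Char Int :=
  arr.foldl (fun d w => d.modify (pvHd w) 0 (· + 1)) PySem.Dict.empty
def pvID (arr : List String) : PySem.Dict Char Int :=
  arr.foldl (fun d w => d.modify (pvLst w) 0 (· + 1)) PySem.Dict.empty

theorem pv_filter_len_lt {l : List Char} {p q : Char → Bool} {n : Char}
    (hnd : l.Nodup) (hn : n ∈ l) (hp : p n = true) (hq : q n = false)
    (hrest : ∀ x, x ≠ n → q x = p x) :
    (l.filter q).length + 1 = (l.filter p).length := by
  induction l with
  | nil => cases hn
  | cons a t ih =>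
    rcases List.mem_cons.mp hn with rfl | hat
    · have hnt : n ∉ t := (List.nodup_cons.mp hnd).1
      have ht : t.filter q = t.filter p := by
        apply List.filter_congr
        intro x hx
        exact hrest x (fun h => hnt (h ▸ hx))
      simp [hp, hq, ht]
    · have hne : a ≠ n := fun h => (List.nodup_cons.mp hnd).1 (h ▸ hat)
      have h1 := ih (List.nodup_cons.mp hnd).2 hat
      simp only [List.filter_cons]
      rw [hrest a hne]
      cases hpa : p a <;> simp <;> omega

theorem pv_mem_keys_of_get?_false (v : PySem.Dict Char Bool) (n : Char)
    (h : v.get? n = some false) : n ∈ v.keys := by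
  by_contra hmem
  rw [← PySem.Dict.get?_eq_none_iff_not_mem_keys] at hmem
  rw [h] at hmem
  cases hmem

theorem pv_countFalse_pos (v : PySem.Dict Char Bool) (n : Char)
    (h : v.get? n = some false) : 1 ≤ pvCountFalse v := by
  have hn : n ∈ v.keys := pv_mem_keys_of_get?_false v n h
  have : n ∈ v.keys.filter (fun k => v.get? k == some false) :=
    List.mem_filter.mpr ⟨hn, by simp [h]⟩
  have := List.length_pos_of_mem this
  unfold pvCountFalse
  omega

theorem pv_contains_of_get?_false (v : PySem.Dict Char Bool) (n : Char)
    (h : v.get? n = some false) : v.contains n = true := by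
  rw [PySem.Dict.contains_eq_isSome_get?, h]
  rfl

theorem pv_countFalse_insert (v : PySem.Dict Char Bool) (n : Char)
    (hnd : v.keys.Nodup) (h : v.get? n = some false) :
    pvCountFalse (v.insert n true) + 1 = pvCountFalse v := by
  have hc : v.contains n = true := pv_contains_of_get?_false v n h
  have hk : (v.insert n true).keys = v.keys := PySem.Dict.keys_insert_of_contains v true hc
  unfold pvCountFalse
  rw [hk]
  apply pv_filter_len_lt hnd (pv_mem_keys_of_get?_false v n h)
  · simp [h]
  · simp [PySem.Dict.get?_insert]
  · intro x hx
    simp [PySem.Dict.get?_insert, hx]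

theorem pvDfs_succ (g : PySem.Dict Char (List Char)) (f : Nat) (n : Char) (v : PySem.Dict Char Bool) :
    pvDfs g (f+1) n v = pvDfsGo g f (g.getD n []) (v.insert n true) := by rw [pvDfs]
theorem pvDfsGo_nil (g : PySem.Dict Char (List Char)) (f : Nat) (v : PySem.Dict Char Bool) :
    pvDfsGo g f [] v = v := by rw [pvDfsGo]
theorem pvDfsGo_cons_false (g : PySem.Dict Char (List Char)) (f : Nat) (nb : Char) (rest : List Char)
    (v : PySem.Dict Char Bool) (h : v.get? nb = some false) :
    pvDfsGo g f (nb :: rest) v = pvDfsGo g f rest (pvDfs g f nb v) := by rw [pvDfsGo, h]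
theorem pvDfsGo_cons_skip (g : PySem.Dict Char (List Char)) (f : Nat) (nb : Char) (rest : List Char)
    (v : PySem.Dict Char Bool) (h : v.get? nb ≠ some false) :
    pvDfsGo g f (nb :: rest) v = pvDfsGo g f rest v := by
  rw [pvDfsGo]
  rcases hg : v.get? nb with _ | b
  · rfl
  · cases b
    · exact absurd hg h
    · rfl

def pvProcessed (g : PySem.Dict Char (List Char)) (r : PySem.Dict Char Bool) (x : Char) : Prop :=
  ∀ y ∈ g.getD x [], r.contains y = true → r.get? y = some true

theorem pv_processed_mono (g : PySem.Dict Char (List Char)) {r r' : PySem.Dict Char Bool}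
    (hk : r'.keys = r.keys) (hm : ∀ z, r.get? z = some true → r'.get? z = some true)
    {x : Char} (h : pvProcessed g r x) : pvProcessed g r' x := by
  intro y hy hc
  apply hm
  apply h y hy
  rw [PySem.Dict.contains_iff_mem_keys] at hc ⊢
  rw [← hk]
  exact hc

def DfsOK (g : PySem.Dict Char (List Char)) (f : Nat) : Prop :=
  ∀ n v, v.keys.Nodup → v.get? n = some false → pvCountFalse v ≤ f →
    (pvDfs g f n v).keys = v.keys ∧
    (∀ x, v.get? x = some true → (pvDfs g f n v).get? x = some true) ∧
    (pvDfs g f n v).get? n = some true ∧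
    pvCountFalse (pvDfs g f n v) < pvCountFalse v ∧
    (∀ x, (pvDfs g f n v).get? x = some true →
        v.get? x = some true ∨ Relation.ReflTransGen (fun a b => b ∈ g.getD a []) n x) ∧
    (∀ x, v.get? x ≠ some true → (pvDfs g f n v).get? x = some true → pvProcessed g (pvDfs g f n v) x)

def GoOK (g : PySem.Dict Char (List Char)) (f : Nat) : Prop :=
  ∀ ns v, v.keys.Nodup → pvCountFalse v ≤ f →
    (pvDfsGo g f ns v).keys = v.keys ∧
    (∀ x, v.get? x = some true → (pvDfsGo g f ns v).get? x = some true) ∧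
    pvCountFalse (pvDfsGo g f ns v) ≤ pvCountFalse v ∧
    (∀ x, (pvDfsGo g f ns v).get? x = some true →
        v.get? x = some true ∨ ∃ nb ∈ ns, Relation.ReflTransGen (fun a b => b ∈ g.getD a []) nb x) ∧
    (∀ x, v.get? x ≠ some true → (pvDfsGo g f ns v).get? x = some true → pvProcessed g (pvDfsGo g f ns v) x) ∧
    (∀ nb ∈ ns, v.contains nb = true → (pvDfsGo g f ns v).get? nb = some true)

theorem pv_go_ok (g : PySem.Dict Char (List Char)) (f : Nat) (hd : DfsOK g f) : GoOK g f := by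
  intro ns
  induction ns with
  | nil =>
    intro v hnd hcf
    rw [pvDfsGo_nil]
    refine ⟨rfl, fun x hx => hx, le_refl _, fun x hx => Or.inl hx, fun x hx1 hx2 => absurd hx2 hx1, ?_⟩
    intro nb hnb
    cases hnb
  | cons nb rest ih =>
    intro v hnd hcf
    by_cases hnb : v.get? nb = some false
    · rw [pvDfsGo_cons_false g f nb rest v hnb]
      obtain ⟨Dk, Dmono, Dn, Dcf, Dsound, Dproc⟩ := hd nb v hnd hnb hcf
      have hnd' : (pvDfs g f nb v).keys.Nodup := Dk ▸ hnd
      have hcf' : pvCountFalse (pvDfs g f nb v) ≤ f := le_trans (le_of_lt Dcf) hcf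
      obtain ⟨Gk, Gmono, Gcf, Gsound, Gproc, G7⟩ := ih (pvDfs g f nb v) hnd' hcf'
      refine ⟨Gk.trans Dk, fun x hx => Gmono x (Dmono x hx), le_trans Gcf (le_of_lt Dcf) |>.trans (le_refl _), ?_, ?_, ?_⟩
      · intro x hx
        rcases Gsound x hx with hv' | ⟨mb, hmb, hR⟩
        · rcases Dsound x hv' with hv | hR
          · exact Or.inl hv
          · exact Or.inr ⟨nb, List.mem_cons_self, hR⟩
        · exact Or.inr ⟨mb, List.mem_cons_of_mem _ hmb, hR⟩
      · intro x hx1 hx2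
        by_cases hx' : (pvDfs g f nb v).get? x = some true
        · exact pv_processed_mono g Gk Gmono (Dproc x hx1 hx')
        · exact Gproc x hx' hx2
      · intro nb' hnb' hc
        rcases List.mem_cons.mp hnb' with rfl | hrest
        · exact Gmono nb' Dn
        · apply G7 nb' hrest
          rw [PySem.Dict.contains_iff_mem_keys] at hc ⊢
          rw [Dk]
          exact hc
    · rw [pvDfsGo_cons_skip g f nb rest v hnb]
      obtain ⟨Gk, Gmono, Gcf, Gsound, Gproc, G7⟩ := ih v hnd hcf
      refine ⟨Gk, Gmono, Gcf, ?_, Gproc, ?_⟩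
      · intro x hx
        rcases Gsound x hx with hv | ⟨mb, hmb, hR⟩
        · exact Or.inl hv
        · exact Or.inr ⟨mb, List.mem_cons_of_mem _ hmb, hR⟩
      · intro nb' hnb' hc
        rcases List.mem_cons.mp hnb' with rfl | hrest
        · apply Gmono
          rcases hg : v.get? nb' with _ | b
          · rw [PySem.Dict.contains_eq_isSome_get?, hg] at hc
            cases hc
          · cases b
            · exact absurd hg hnb
            · rfl
        · exact G7 nb' hrest hc

theorem pv_dfs_master (g : PySem.Dict Char (List Char)) : ∀ f, DfsOK g f ∧ GoOK g f := by
  intro f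
  induction f with
  | zero =>
    have hd : DfsOK g 0 := by
      intro n v hnd hget hcf
      have := pv_countFalse_pos v n hget
      omega
    exact ⟨hd, pv_go_ok g 0 hd⟩
  | succ f ihf =>
    have hd : DfsOK g (f+1) := by
      intro n v hnd hget hcf
      rw [pvDfs_succ]
      have hc : v.contains n = true := pv_contains_of_get?_false v n hget
      have hk1 : (v.insert n true).keys = v.keys := PySem.Dict.keys_insert_of_contains v true hc
      have hcf1 : pvCountFalse (v.insert n true) + 1 = pvCountFalse v := pv_countFalse_insert v n hnd hget
      have hnd1 : (v.insert n true).keys.Nodup := hk1 ▸ hnd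
      obtain ⟨Gk, Gmono, Gcf, Gsound, Gproc, G7⟩ :=
        (pv_go_ok g f ihf.1) (g.getD n []) (v.insert n true) hnd1 (by omega)
      have hmono : ∀ x, v.get? x = some true →
          (pvDfsGo g f (g.getD n []) (v.insert n true)).get? x = some true := by
        intro x hx
        apply Gmono
        rw [PySem.Dict.get?_insert]
        by_cases hxn : x = n
        · simp [hxn]
        · rw [if_neg hxn]
          exact hx
      have hn' : (pvDfsGo g f (g.getD n []) (v.insert n true)).get? n = some true := by
        apply Gmono
        rw [PySem.Dict.get?_insert]
        simp
      refine ⟨Gk.trans hk1, hmono, hn', by omega, ?_, ?_⟩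
      · intro x hx
        rcases Gsound x hx with h1 | ⟨mb, hmb, hR⟩
        · rw [PySem.Dict.get?_insert] at h1
          by_cases hxn : x = n
          · exact Or.inr (hxn ▸ Relation.ReflTransGen.refl)
          · rw [if_neg hxn] at h1
            exact Or.inl h1
        · exact Or.inr (Relation.ReflTransGen.head hmb hR)
      · intro x hx1 hx2
        by_cases hxn : x = n
        · subst hxn
          intro y hy hcy
          apply G7 y hy
          rw [PySem.Dict.contains_iff_mem_keys] at hcy ⊢
          rw [Gk] at hcy
          exact hcy
        · apply Gproc
          · rw [PySem.Dict.get?_insert, if_neg hxn]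
            exact hx1
          · exact hx2
    exact ⟨hd, pv_go_ok g (f+1) hd⟩

-- the inner sweep of B
def pvPass (arr : List String) (r : List Char) : List Char :=
  arr.foldl (fun r w => if PySem.Set.contains r (pvHd w) then PySem.Set.add r (pvLst w) else r) r

theorem pv_step_cases (r : List Char) (w : String) :
    (if PySem.Set.contains r (pvHd w) then PySem.Set.add r (pvLst w) else r) = r ∨
    (if PySem.Set.contains r (pvHd w) then PySem.Set.add r (pvLst w) else r) = r ++ [pvLst w] := by
  by_cases h : PySem.Set.contains r (pvHd w) = true
  · rw [if_pos h]
    by_cases h2 : pvLst w ∈ r <;> simp [PySem.Set.add, PySem.Set.contains, h2]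
  · rw [if_neg h]
    exact Or.inl rfl

theorem pv_mem_step {r : List Char} {w : String} {x : Char} :
    x ∈ (if PySem.Set.contains r (pvHd w) then PySem.Set.add r (pvLst w) else r) ↔
      x ∈ r ∨ (pvHd w ∈ r ∧ x = pvLst w) := by
  by_cases h : PySem.Set.contains r (pvHd w) = true
  · rw [if_pos h]
    rw [PySem.Set.contains] at h
    simp only [PySem.Set.mem_add]
    constructor
    · rintro (hx | rfl)
      · exact Or.inl hx
      · exact Or.inr ⟨by simpa using h, rfl⟩
    · rintro (hx | ⟨_, rfl⟩)
      · exact Or.inl hx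
      · exact Or.inr rfl
  · rw [if_neg h]
    rw [PySem.Set.contains] at h
    constructor
    · exact Or.inl
    · rintro (hx | ⟨hh, rfl⟩)
      · exact hx
      · exact absurd (by simpa using hh) h

theorem pv_pass_prefix : ∀ (l : List String) (r : List Char),
    r <+: l.foldl (fun r w => if PySem.Set.contains r (pvHd w) then PySem.Set.add r (pvLst w) else r) r := by
  intro l
  induction l with
  | nil => intro r; exact List.prefix_refl r
  | cons w t ih =>
    intro r
    simp only [List.foldl_cons]
    rcases pv_step_cases r w with h | h
    · rw [h]; exact ih r
    · rw [h]
      exact List.IsPrefix.trans (List.prefix_append r [pvLst w]) (ih _)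

theorem pv_pass_mem (l : List String) (r : List Char) {x : Char} (hx : x ∈ r) :
    x ∈ l.foldl (fun r w => if PySem.Set.contains r (pvHd w) then PySem.Set.add r (pvLst w) else r) r :=
  (pv_pass_prefix l r).subset hx

theorem pv_pass_nodup : ∀ (l : List String) (r : List Char), r.Nodup →
    (l.foldl (fun r w => if PySem.Set.contains r (pvHd w) then PySem.Set.add r (pvLst w) else r) r).Nodup := by
  intro l
  induction l with
  | nil => intro r h; exact h
  | cons w t ih =>
    intro r h
    simp only [List.foldl_cons]
    apply ih
    by_cases hc : PySem.Set.contains r (pvHd w) = true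
    · rw [if_pos hc]
      by_cases h2 : pvLst w ∈ r
      · have he : PySem.Set.add r (pvLst w) = r := by simp [PySem.Set.add, PySem.Set.contains, h2]
        rw [he]; exact h
      · have he : PySem.Set.add r (pvLst w) = r ++ [pvLst w] := by simp [PySem.Set.add, PySem.Set.contains, h2]
        rw [he, List.nodup_append]
        refine ⟨h, List.nodup_singleton _, ?_⟩
        intro a ha b hb
        rw [List.mem_singleton] at hb
        subst hb
        exact fun he2 => h2 (he2 ▸ ha)
    · rw [if_neg hc]; exact h

theorem pv_pass_sound (arr : List String) (s : Char) : ∀ (l : List String) (r : List Char),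
    (∀ w ∈ l, w ∈ arr) → (∀ x ∈ r, pvR arr s x) →
    ∀ x ∈ l.foldl (fun r w => if PySem.Set.contains r (pvHd w) then PySem.Set.add r (pvLst w) else r) r,
      pvR arr s x := by
  intro l
  induction l with
  | nil => intro r _ hr; exact hr
  | cons w t ih =>
    intro r hl hr
    simp only [List.foldl_cons]
    apply ih _ (fun w' hw' => hl w' (List.mem_cons_of_mem _ hw'))
    intro x hx
    rcases pv_mem_step.mp hx with hx | ⟨hh, rfl⟩
    · exact hr x hx
    · exact Relation.ReflTransGen.tail (hr _ hh) ⟨w, hl w List.mem_cons_self, rfl, rfl⟩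

theorem pv_pass_subset (arr : List String) : ∀ (l : List String) (r : List Char),
    ∀ x ∈ l.foldl (fun r w => if PySem.Set.contains r (pvHd w) then PySem.Set.add r (pvLst w) else r) r,
      x ∈ r ∨ x ∈ l.map pvLst := by
  intro l
  induction l with
  | nil => intro r x hx; exact Or.inl hx
  | cons w t ih =>
    intro r x hx
    simp only [List.foldl_cons] at hx
    rcases ih _ x hx with hx' | hx'
    · rcases pv_mem_step.mp hx' with hx'' | ⟨_, rfl⟩
      · exact Or.inl hx''
      · exact Or.inr (by simp)
    · exact Or.inr (List.mem_cons_of_mem _ (by simpa using hx'))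

theorem pv_pass_lst (arr : List String) : ∀ (l : List String) (r : List Char) (w : String),
    w ∈ l → pvHd w ∈ r →
    pvLst w ∈ l.foldl (fun r w => if PySem.Set.contains r (pvHd w) then PySem.Set.add r (pvLst w) else r) r := by
  intro l
  induction l with
  | nil => intro r w hw; cases hw
  | cons w0 t ih =>
    intro r w hw hhd
    simp only [List.foldl_cons]
    rcases List.mem_cons.mp hw with rfl | hwt
    · apply pv_pass_mem
      rw [if_pos (by simp [PySem.Set.contains, hhd])]
      simp [PySem.Set.mem_add]
    · apply ih _ w hwt
      rcases pv_step_cases r w0 with h | h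
      · rw [h]; exact hhd
      · rw [h]; exact List.mem_append_left _ hhd

theorem pv_foldl_const {α β : Type} (f : α → α) : ∀ (l : List β) (r : α),
    l.foldl (fun r _ => f r) r = f^[l.length] r := by
  intro l
  induction l with
  | nil => intro r; rfl
  | cons b t ih =>
    intro r
    simp only [List.foldl_cons, List.length_cons]
    rw [ih, ← Function.iterate_succ_apply]

theorem pv_iter_grow (arr : List String) : ∀ (k : Nat) (r : List Char),
    (pvPass arr) ((pvPass arr)^[k] r) = (pvPass arr)^[k] r ∨
      r.length + k ≤ ((pvPass arr)^[k] r).length := by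
  intro k
  induction k with
  | zero => intro r; exact Or.inr (by simp)
  | succ k ih =>
    intro r
    rcases ih r with hfix | hlen
    · rw [Function.iterate_succ_apply', hfix]
      exact Or.inl hfix
    · set X := (pvPass arr)^[k] r with hX
      have hpre : X <+: pvPass arr X := pv_pass_prefix arr X
      rcases Nat.lt_or_ge X.length (pvPass arr X).length with hlt | hge
      · rw [Function.iterate_succ_apply', ← hX]
        exact Or.inr (by omega)
      · have heq : pvPass arr X = X :=
          (List.IsPrefix.eq_of_length hpre (le_antisymm hpre.length_le hge)).symm
        rw [Function.iterate_succ_apply', ← hX, heq]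
        exact Or.inl heq

theorem pv_iter_subset (arr : List String) : ∀ (k : Nat) (r : List Char) (x : Char),
    x ∈ (pvPass arr)^[k] r → x ∈ r ∨ x ∈ arr.map pvLst := by
  intro k
  induction k with
  | zero => intro r x hx; exact Or.inl hx
  | succ k ih =>
    intro r x hx
    rw [Function.iterate_succ_apply'] at hx
    rcases pv_pass_subset arr arr _ x hx with hx' | hx'
    · exact ih r x hx'
    · exact Or.inr hx'

theorem pv_iter_nodup (arr : List String) : ∀ (k : Nat) (r : List Char), r.Nodup →
    ((pvPass arr)^[k] r).Nodup := by
  intro k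
  induction k with
  | zero => intro r h; exact h
  | succ k ih =>
    intro r h
    rw [Function.iterate_succ_apply']
    exact pv_pass_nodup arr _ (ih r h)

theorem pv_iter_mem (arr : List String) : ∀ (k : Nat) (r : List Char) (x : Char), x ∈ r →
    x ∈ (pvPass arr)^[k] r := by
  intro k
  induction k with
  | zero => intro r x hx; exact hx
  | succ k ih =>
    intro r x hx
    rw [Function.iterate_succ_apply']
    exact pv_pass_mem arr _ (ih r x hx)

theorem pv_final_closed (arr : List String) (s : Char) (w : String) (hw : w ∈ arr)
    (hhd : pvHd w ∈ (pvPass arr)^[arr.length] [s]) :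
    pvLst w ∈ (pvPass arr)^[arr.length] [s] := by
  set F := (pvPass arr)^[arr.length] [s] with hF
  rcases pv_iter_grow arr arr.length [s] with hfix | hlen
  · rw [← hF] at hfix
    rw [← hfix]
    exact pv_pass_lst arr arr F w hw hhd
  · have hsub : F ⊆ s :: arr.map pvLst := by
      intro x hx
      rcases pv_iter_subset arr arr.length [s] x hx with h1 | h1
      · rw [List.mem_singleton.mp h1]
        exact List.mem_cons_self
      · exact List.mem_cons_of_mem _ h1
    have hnd : F.Nodup := pv_iter_nodup arr arr.length [s] (List.nodup_singleton s)
    have hperm : F.Perm (s :: arr.map pvLst) := by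
      apply (hnd.subperm hsub).perm_of_length_le
      simp only [List.length_cons, List.length_map]
      rw [← hF] at hlen
      simp only [List.length_singleton] at hlen
      omega
    exact hperm.mem_iff.mpr (List.mem_cons_of_mem _ (List.mem_map_of_mem hw))

theorem pv_final_complete (arr : List String) (s : Char) (x : Char)
    (h : pvR arr s x) : x ∈ (pvPass arr)^[arr.length] [s] := by
  induction h with
  | refl => exact pv_iter_mem arr arr.length [s] s (by simp)
  | tail hR hE ih =>
    obtain ⟨w, hw, hhd, hlst⟩ := hE
    rw [← hlst]
    exact pv_final_closed arr s w hw (hhd ▸ ih)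

theorem pv_final_sound (arr : List String) (s : Char) (x : Char)
    (h : x ∈ (pvPass arr)^[arr.length] [s]) : pvR arr s x := by
  have : ∀ (k : Nat) (x : Char), x ∈ (pvPass arr)^[k] [s] → pvR arr s x := by
    intro k
    induction k with
    | zero =>
      intro x hx
      exact (List.mem_singleton.mp hx) ▸ Relation.ReflTransGen.refl
    | succ k ih =>
      intro x hx
      rw [Function.iterate_succ_apply'] at hx
      exact pv_pass_sound arr s arr _ (fun w hw => hw) ih x hx
  exact this arr.length x h


theorem pv_build_eq (arr : List String) :
    arr.foldl (fun st w =>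
        (st.1.modify (pvHd w) [] (fun l => l ++ [pvLst w]),
         st.2.1.modify (pvHd w) 0 (· + 1),
         st.2.2.modify (pvLst w) 0 (· + 1)))
      ((PySem.Dict.empty : PySem.Dict Char (List Char)),
       (PySem.Dict.empty : PySem.Dict Char Int),
       (PySem.Dict.empty : PySem.Dict Char Int)) = (pvG arr, pvOD arr, pvID arr) := by
  rw [PySem.List.foldl_prod_mk
      (f := fun (d : PySem.Dict Char (List Char)) w => d.modify (pvHd w) [] (fun l => l ++ [pvLst w]))
      (g := fun (p : PySem.Dict Char Int × PySem.Dict Char Int) w =>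
        (p.1.modify (pvHd w) 0 (· + 1), p.2.modify (pvLst w) 0 (· + 1)))]
  rw [PySem.List.foldl_prod_mk
      (f := fun (d : PySem.Dict Char Int) w => d.modify (pvHd w) 0 (· + 1))
      (g := fun (d : PySem.Dict Char Int) w => d.modify (pvLst w) 0 (· + 1))]
  rfl

theorem pv_G_keys (arr : List String) : (pvG arr).keys = PySem.Set.ofList (arr.map pvHd) := by
  unfold pvG
  rw [PySem.Dict.keys_foldl_modify_key arr pvHd [] (fun _ w => (fun l => l ++ [pvLst w]))]
  rw [PySem.Set.ofList_eq_foldl]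
  rfl

theorem pv_G_nodup (arr : List String) : (pvG arr).keys.Nodup := by
  rw [pv_G_keys]
  exact PySem.Set.nodup_ofList _

theorem pv_G_getD_mem (arr : List String) (x y : Char) :
    y ∈ (pvG arr).getD x [] ↔ pvE arr x y := by
  unfold pvG
  have hmap : arr.foldl (fun d w => d.modify (pvHd w) [] (fun l => l ++ [pvLst w]))
        (PySem.Dict.empty : PySem.Dict Char (List Char))
      = (arr.map (fun w => (pvHd w, pvLst w))).foldl
          (fun d p => d.modify p.1 [] (fun l => l ++ [p.2])) PySem.Dict.empty := by
    rw [List.foldl_map]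
  rw [hmap, PySem.Dict.getD_foldl_modify_append]
  simp only [PySem.Dict.getD_empty, List.nil_append, List.mem_map, List.mem_filter, pvE]
  constructor
  · rintro ⟨⟨hh, hl⟩, ⟨⟨w, hw, hwe⟩, hbeq⟩, rfl⟩
    injection hwe with e1 e2
    simp only [beq_iff_eq] at hbeq
    exact ⟨w, hw, by rw [e1]; exact hbeq, e2⟩
  · rintro ⟨w, hw, rfl, rfl⟩
    exact ⟨(pvHd w, pvLst w), ⟨⟨w, hw, rfl⟩, by simp⟩, rfl⟩

theorem pv_OD_getD (arr : List String) (c : Char) :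
    (pvOD arr).getD c 0 = ((arr.map pvHd).count c : Int) := by
  unfold pvOD
  rw [← List.foldl_map (f := pvHd) (g := fun (d : PySem.Dict Char Int) x => d.modify x 0 (· + 1))]
  rw [PySem.Dict.getD_foldl_modify_add_one]
  simp

theorem pv_ID_getD (arr : List String) (c : Char) :
    (pvID arr).getD c 0 = ((arr.map pvLst).count c : Int) := by
  unfold pvID
  rw [← List.foldl_map (f := pvLst) (g := fun (d : PySem.Dict Char Int) x => d.modify x 0 (· + 1))]
  rw [PySem.Dict.getD_foldl_modify_add_one]
  simp

theorem pv_v0_items (L : List Char) (h : L.Nodup) :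
    (L.foldl (fun d k => d.insert k false) (PySem.Dict.empty : PySem.Dict Char Bool)).items
      = L.map (fun k => (k, false)) := by
  rw [PySem.Dict.items_foldl_insert_fresh L (fun x => x) (fun _ => false)]
  · simp [show (PySem.Dict.empty : PySem.Dict Char Bool).items = [] from rfl]
  · intro a _
    simp [PySem.Dict.contains_empty]
  · simpa using h

theorem pv_v0_keys (L : List Char) (h : L.Nodup) :
    (L.foldl (fun d k => d.insert k false) (PySem.Dict.empty : PySem.Dict Char Bool)).keys = L := by
  show ((L.foldl (fun d k => d.insert k false) PySem.Dict.empty).items.map (·.1)) = L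
  rw [pv_v0_items L h]
  rw [List.map_map]
  rw [show ((fun x : Char × Bool => x.1) ∘ fun k : Char => (k, false)) = id from rfl, List.map_id]

theorem pv_v0_get? (L : List Char) (h : L.Nodup) (k : Char) :
    (L.foldl (fun d k => d.insert k false) (PySem.Dict.empty : PySem.Dict Char Bool)).get? k
      = if k ∈ L then some false else none := by
  set d := L.foldl (fun d k => d.insert k false) (PySem.Dict.empty : PySem.Dict Char Bool) with hd
  have hnd : d.keys.Nodup := by rw [hd, pv_v0_keys L h]; exact h
  by_cases hk : k ∈ L
  · rw [if_pos hk]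
    rw [PySem.Dict.get?_eq_some_iff_mem_items d k false hnd, hd, pv_v0_items L h]
    exact List.mem_map_of_mem hk
  · rw [if_neg hk]
    rw [PySem.Dict.get?_eq_none_iff_not_mem_keys, hd, pv_v0_keys L h]
    exact hk

theorem pv_R_iff (arr : List String) (s x : Char) :
    Relation.ReflTransGen (fun a b => b ∈ (pvG arr).getD a []) s x ↔ pvR arr s x := by
  constructor
  · exact Relation.ReflTransGen.mono (fun a b hab => (pv_G_getD_mem arr a b).mp hab)
  · exact Relation.ReflTransGen.mono (fun a b hab => (pv_G_getD_mem arr a b).mpr hab)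

-- A's DFS marks exactly the reachable start letters
theorem pv_A_visited (arr : List String) (s : Char) (hs : s ∈ (pvG arr).keys) :
    (pvDfs (pvG arr)
        (pvCountFalse ((pvG arr).keys.foldl (fun d k => d.insert k false) PySem.Dict.empty) + 1) s
        ((pvG arr).keys.foldl (fun d k => d.insert k false) PySem.Dict.empty)).keys = (pvG arr).keys ∧
    ∀ k ∈ (pvG arr).keys,
      ((pvDfs (pvG arr)
        (pvCountFalse ((pvG arr).keys.foldl (fun d k => d.insert k false) PySem.Dict.empty) + 1) s
        ((pvG arr).keys.foldl (fun d k => d.insert k false) PySem.Dict.empty)).getD k false = true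
      ↔ pvR arr s k) := by
  set g := pvG arr with hg
  set v0 := g.keys.foldl (fun d k => d.insert k false) (PySem.Dict.empty : PySem.Dict Char Bool) with hv0
  have hnodG : g.keys.Nodup := pv_G_nodup arr
  have hk0 : v0.keys = g.keys := pv_v0_keys g.keys hnodG
  have hnd0 : v0.keys.Nodup := by rw [hk0]; exact hnodG
  have hget0 : ∀ k, v0.get? k = if k ∈ g.keys then some false else none := pv_v0_get? g.keys hnodG
  have hgs : v0.get? s = some false := by rw [hget0, if_pos hs]
  obtain ⟨Dk, Dmono, Dn, Dcf, Dsound, Dproc⟩ :=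
    (pv_dfs_master g (pvCountFalse v0 + 1)).1 s v0 hnd0 hgs (by omega)
  set r := pvDfs g (pvCountFalse v0 + 1) s v0 with hr
  have hkeys : r.keys = g.keys := Dk.trans hk0
  have hnotrue : ∀ x, v0.get? x ≠ some true := by
    intro x
    rw [hget0]
    split <;> simp
  -- backward: reachable keys are marked
  have hback : ∀ k, k ∈ g.keys → pvR arr s k → r.get? k = some true := by
    intro k hkmem hkR
    rw [← pv_R_iff] at hkR
    induction hkR with
    | refl => exact Dn
    | @tail b c hRb hEc ih =>
      have hbkey : b ∈ g.keys := by
        by_contra hbk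
        rw [PySem.Dict.getD_eq_get?_getD,
          (PySem.Dict.get?_eq_none_iff_not_mem_keys g b).mpr hbk] at hEc
        cases hEc
      have hbtrue : r.get? b = some true := ih hbkey
      have hproc : pvProcessed g r b := Dproc b (hnotrue b) hbtrue
      apply hproc _ hEc
      rw [PySem.Dict.contains_iff_mem_keys, hkeys]
      exact ‹c ∈ g.keys›
  constructor
  · exact hkeys
  · intro k hk
    constructor
    · intro hmark
      have hsome : r.get? k = some true := by
        rw [PySem.Dict.getD_eq_get?_getD] at hmark
        rcases hh : r.get? k with _ | b
        · rw [hh] at hmark; cases hmark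
        · rw [hh] at hmark
          simp at hmark
          rw [hmark]
      rcases Dsound k hsome with h1 | h1
      · exact absurd h1 (hnotrue k)
      · exact (pv_R_iff arr s k).mp h1
    · intro hR
      rw [PySem.Dict.getD_eq_get?_getD, hback k hk hR]
      rfl

-- ===== VERDICT (by name: the statement is the Claim_ definition above) =====
theorem can_form_circle_spec : Claim_equal_can_form_circle := by
  intro arr _ _
  unfold Spec_can_form_circle can_form_circle can_form_circle_alt
  by_cases h0 : arr = []
  · rw [if_pos h0, if_pos h0]
  · rw [if_neg h0, if_neg h0]
    simp only [pv_build_eq]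
    -- the two degree guards are the same boolean
    have hguardEq : ((pvG arr).keys.any fun node => !(pvID arr).getD node 0 == (pvOD arr).getD node 0)
        = ((PySem.Dict.counter (arr.map pvHd)).keys.any fun c =>
            !(PySem.Dict.counter (arr.map pvLst)).getD c 0 ==
              (PySem.Dict.counter (arr.map pvHd)).getD c 0) := by
      rw [pv_G_keys, PySem.Dict.keys_counter]
      exact PySem.List.any_congr_mem (fun c _ => by
        rw [pv_ID_getD, pv_OD_getD, PySem.Dict.getD_counter, PySem.Dict.getD_counter])
    rw [hguardEq]
    by_cases hdeg : ((PySem.Dict.counter (arr.map pvHd)).keys.any fun c =>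
            !(PySem.Dict.counter (arr.map pvLst)).getD c 0 ==
              (PySem.Dict.counter (arr.map pvHd)).getD c 0) = true
    · rw [if_pos hdeg, if_pos hdeg]
    · rw [if_neg hdeg, if_neg hdeg]
      rw [PySem.Dict.keys_counter]
      -- connectivity
      have hne : arr ≠ [] := h0
      set s := pvHd (arr.headD "") with hsdef
      have hs : s ∈ (pvG arr).keys := by
        rw [pv_G_keys]
        apply (PySem.Set.mem_ofList _ _).mpr
        rw [hsdef]
        cases arr with
        | nil => exact absurd rfl hne
        | cons a t => exact List.mem_map_of_mem List.mem_cons_self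
      obtain ⟨hkeys, hiff⟩ := pv_A_visited arr s hs
      have hreach : (List.foldl
            (fun r _ => List.foldl
              (fun r w => if PySem.Set.contains r (pvHd w) then PySem.Set.add r (pvLst w) else r) r arr)
            (PySem.Set.ofList [s]) arr) = (pvPass arr)^[arr.length] [s] :=
        pv_foldl_const (pvPass arr) arr (PySem.Set.ofList [s])
      have hmemhd : ∀ k, k ∈ PySem.Set.ofList (arr.map pvHd) ↔ k ∈ (pvG arr).keys := by
        intro k
        rw [pv_G_keys]
      by_cases hP : ∀ k ∈ (pvG arr).keys, pvR arr s k
      · have hA : ((pvDfs (pvG arr)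
            (pvCountFalse (List.foldl (fun d k => d.insert k false) PySem.Dict.empty (pvG arr).keys) + 1) s
            (List.foldl (fun d k => d.insert k false) PySem.Dict.empty (pvG arr).keys)).keys.any
              fun node => !(pvDfs (pvG arr)
                (pvCountFalse (List.foldl (fun d k => d.insert k false) PySem.Dict.empty (pvG arr).keys) + 1) s
                (List.foldl (fun d k => d.insert k false) PySem.Dict.empty (pvG arr).keys)).getD node false) = false := by
          rw [List.any_eq_false]
          intro k hk
          rw [hkeys] at hk
          simp only [Bool.not_eq_true']
          rw [Bool.not_eq_false]
          exact (hiff k hk).mpr (hP k hk)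
        have hB : ((PySem.Set.ofList (arr.map pvHd)).all fun c =>
            (List.foldl
              (fun r _ => List.foldl
                (fun r w => if PySem.Set.contains r (pvHd w) then PySem.Set.add r (pvLst w) else r) r arr)
              (PySem.Set.ofList [s]) arr).contains c) = true := by
          rw [List.all_eq_true]
          intro c hc
          rw [hreach]
          simp only [PySem.Set.contains, List.contains_eq_mem, decide_eq_true_eq]
          exact pv_final_complete arr s c (hP c ((hmemhd c).mp hc))
        rw [hA, hB]
        rfl
      · have hP' : ∃ k ∈ (pvG arr).keys, ¬ pvR arr s k := by
          by_contra hno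
          apply hP
          intro k hk
          by_contra hbad
          exact hno ⟨k, hk, hbad⟩
        obtain ⟨k, hk, hkR⟩ := hP'
        have hA : ((pvDfs (pvG arr)
            (pvCountFalse (List.foldl (fun d k => d.insert k false) PySem.Dict.empty (pvG arr).keys) + 1) s
            (List.foldl (fun d k => d.insert k false) PySem.Dict.empty (pvG arr).keys)).keys.any
              fun node => !(pvDfs (pvG arr)
                (pvCountFalse (List.foldl (fun d k => d.insert k false) PySem.Dict.empty (pvG arr).keys) + 1) s
                (List.foldl (fun d k => d.insert k false) PySem.Dict.empty (pvG arr).keys)).getD node false) = true := by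
          rw [List.any_eq_true]
          refine ⟨k, ?_, ?_⟩
          · rw [hkeys]
            exact hk
          · simp only [Bool.not_eq_true']
            rw [Bool.eq_false_iff]
            intro hcon
            exact hkR ((hiff k hk).mp hcon)
        have hB : ((PySem.Set.ofList (arr.map pvHd)).all fun c =>
            (List.foldl
              (fun r _ => List.foldl
                (fun r w => if PySem.Set.contains r (pvHd w) then PySem.Set.add r (pvLst w) else r) r arr)
              (PySem.Set.ofList [s]) arr).contains c) = false := by
          rw [List.all_eq_false]
          refine ⟨k, (hmemhd k).mpr hk, ?_⟩
          rw [hreach]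
          simp only [PySem.Set.contains, List.contains_eq_mem, decide_eq_true_eq]
          intro hmem
          exact hkR (pv_final_sound arr s k hmem)
        rw [hA, hB]
        rfl
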